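-- pv_equiv track=rewrite | github.com/ksero225/HackathonKONST | user-description-bot-assistance/knn_gruping/clustering.py | split_into_chunks_with_range
-- ===== SOURCE A (Python) =====
-- from typing import Dict, List
--
-- def split_into_chunks_with_range(total: int, min_size: int = 3, max_size: int = 8) -> List[int]:
--     sizes = []
--     remaining = total
--
--     while remaining > 0:
--         if min_size <= remaining <= max_size:
--             sizes.append(remaining)
--             break
--
--         chosen = None
--         for k in range(max_size, min_size - 1, -1):
--             rest = remaining - k
--             if rest == 0 or rest >= min_size:
--                 chosen = k
--                 break
--
--         if chosen is None:
--             sizes.append(remaining)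
--             break
--
--         sizes.append(chosen)
--         remaining -= chosen
--
--     return sizes
-- ===== SOURCE B (Python) =====
-- def split_into_chunks_with_range(total: int, min_size: int = 3, max_size: int = 8):
--     # Closed-form: n full max_size chunks, then an arithmetic tail.
--     if total <= 0:
--         return []
--     if min_size > max_size or max_size <= 0:
--         return [total]
--     m = max(min_size, 1)
--     if total >= max_size + m:
--         n = (total - max_size - m) // max_size + 1
--     else:
--         n = 0
--     leftover = total - n * max_size
--     if leftover <= max_size or leftover < 2 * min_size:
--         tail = [leftover]
--     else:
--         tail = [leftover - min_size, min_size]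
--     return [max_size] * n + tail
-- ===== Notes on version B (the rewrite author's own statement) =====
-- stated objective: faster
-- what changed: Replaces A's per-chunk while-loop with inner linear scan by a closed arithmetic form: the number of full max_size chunks is computed with one floor division and the tail ([leftover] or [leftover-min_size, min_size]) in O(1).
import Mathlib
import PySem

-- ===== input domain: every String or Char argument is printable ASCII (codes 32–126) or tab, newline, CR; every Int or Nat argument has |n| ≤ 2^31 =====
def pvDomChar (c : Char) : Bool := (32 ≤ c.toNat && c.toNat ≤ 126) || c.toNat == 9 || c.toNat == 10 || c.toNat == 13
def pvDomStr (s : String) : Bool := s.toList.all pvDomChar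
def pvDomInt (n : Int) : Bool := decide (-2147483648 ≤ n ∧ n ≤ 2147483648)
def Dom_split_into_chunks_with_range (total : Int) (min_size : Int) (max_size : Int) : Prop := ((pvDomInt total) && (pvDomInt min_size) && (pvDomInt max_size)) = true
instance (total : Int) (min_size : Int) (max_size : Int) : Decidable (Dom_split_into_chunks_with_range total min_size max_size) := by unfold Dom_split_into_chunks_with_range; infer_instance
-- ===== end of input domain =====

-- B replaces A's chunk-by-chunk decrementing while-loop (with inner scan) by a
-- closed arithmetic form: one floor division gives the number of full max_size
-- chunks, the tail is computed directly; objective: faster (no per-chunk loop).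

-- ===== PORT A =====
-- inner `for k in range(max_size, min_size-1, -1): … break` of A; ported as a
-- lazy countdown over the same k sequence (n counts the remaining range
-- elements), exactly mirroring Python's early `break`
def pvChooseGo (remaining : Int) (min_size : Int) : Nat → Int → Option Int
  | 0, _ => none
  | n + 1, k =>
    let rest := remaining - k
    if rest = 0 ∨ rest ≥ min_size then some k
    else pvChooseGo remaining min_size n (k - 1)

def pvChooseA (remaining : Int) (min_size : Int) (max_size : Int) : Option Int :=
  pvChooseGo remaining min_size (max_size - (min_size - 1)).toNat max_size

-- the `while remaining > 0` loop of A (fuel only makes it total; on inputs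
-- satisfying Pre_ each iteration strictly decreases `remaining`, so fuel
-- `total.toNat + 1` is never exhausted)
def pvLoopA (fuel : Nat) (remaining : Int) (min_size : Int) (max_size : Int) (sizes : List Int) : List Int :=
  match fuel with
  | 0 => sizes
  | fuel + 1 =>
    if remaining > 0 then
      if min_size ≤ remaining ∧ remaining ≤ max_size then sizes ++ [remaining]
      else
        match pvChooseA remaining min_size max_size with
        | none => sizes ++ [remaining]
        | some chosen => pvLoopA fuel (remaining - chosen) min_size max_size (sizes ++ [chosen])
    else sizes

def split_into_chunks_with_range (total : Int) (min_size : Int) (max_size : Int) : List Int :=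
  pvLoopA (total.toNat + 1) total min_size max_size []

-- ===== PORT B =====
def split_into_chunks_with_range_alt (total : Int) (min_size : Int) (max_size : Int) : List Int :=
  if total ≤ 0 then []
  else if min_size > max_size ∨ max_size ≤ 0 then [total]
  else
    let m := max min_size 1
    let n : Int := if total ≥ max_size + m then PySem.Int.floordiv (total - max_size - m) max_size + 1 else 0
    let leftover := total - n * max_size
    let tail := if leftover ≤ max_size ∨ leftover < 2 * min_size then [leftover] else [leftover - min_size, min_size]
    List.replicate n.toNat max_size ++ tail

-- ===== PRECONDITION & SPEC =====
-- Pre_ excludes exactly the inputs on which A never returns: for total > 0 and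
-- min_size ≤ max_size ≤ 0 the chosen chunk is ≤ 0 and A's while-loop diverges.
def Pre_split_into_chunks_with_range (total : Int) (min_size : Int) (max_size : Int) : Prop :=
  total ≤ 0 ∨ 0 < max_size ∨ max_size < min_size
instance (total : Int) (min_size : Int) (max_size : Int) : Decidable (Pre_split_into_chunks_with_range total min_size max_size) := by unfold Pre_split_into_chunks_with_range; infer_instance

def pvWitness_split_into_chunks_with_range : Int × Int × Int := (20, 3, 8)

def Spec_split_into_chunks_with_range (total : Int) (min_size : Int) (max_size : Int) (out : List Int) : Prop := out = split_into_chunks_with_range_alt total min_size max_size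
instance (total : Int) (min_size : Int) (max_size : Int) (out : List Int) : Decidable (Spec_split_into_chunks_with_range total min_size max_size out) := by unfold Spec_split_into_chunks_with_range; infer_instance

-- ===== CLAIM (what is proved, stated in full; the proofs are below) =====
def Claim_equal_split_into_chunks_with_range : Prop := ∀ (total : Int) (min_size : Int) (max_size : Int), Dom_split_into_chunks_with_range total min_size max_size → Pre_split_into_chunks_with_range total min_size max_size → Spec_split_into_chunks_with_range total min_size max_size (split_into_chunks_with_range total min_size max_size)

-- ===== LEMMAS AND PROOFS =====

-- pvChooseA characterisation, first the generic findSome? steps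
theorem chooseA_head {remaining min_size max_size : Int}
    (hlt : min_size - 1 < max_size)
    (hp : remaining - max_size = 0 ∨ remaining - max_size ≥ min_size) :
    pvChooseA remaining min_size max_size = some max_size := by
  unfold pvChooseA
  have hn : (max_size - (min_size - 1)).toNat = (max_size - 1 - (min_size - 1)).toNat + 1 := by omega
  rw [hn]
  simp [pvChooseGo, hp]

theorem chooseA_tail {remaining min_size max_size : Int}
    (hlt : min_size - 1 < max_size)
    (hp : ¬ (remaining - max_size = 0 ∨ remaining - max_size ≥ min_size)) :
    pvChooseA remaining min_size max_size = pvChooseA remaining min_size (max_size - 1) := by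
  unfold pvChooseA
  have hn : (max_size - (min_size - 1)).toNat = (max_size - 1 - (min_size - 1)).toNat + 1 := by omega
  rw [hn]
  simp [pvChooseGo, hp]

theorem chooseGo_none (remaining min_size : Int) :
    ∀ (n : Nat) (k : Int), (∀ j : Int, k - n < j → j ≤ k → ¬ (remaining - j = 0 ∨ remaining - j ≥ min_size)) →
    pvChooseGo remaining min_size n k = none := by
  intro n
  induction n with
  | zero => intro k _; rfl
  | succ n ih =>
    intro k h
    have hk : ¬ (remaining - k = 0 ∨ remaining - k ≥ min_size) := h k (by omega) (le_refl k)
    simp only [pvChooseGo, hk, ite_false]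
    exact ih (k - 1) (fun j hj1 hj2 => h j (by omega) (by omega))

theorem chooseA_none {remaining min_size max_size : Int}
    (h : ∀ k, min_size ≤ k → k ≤ max_size → ¬ (remaining - k = 0 ∨ remaining - k ≥ min_size)) :
    pvChooseA remaining min_size max_size = none := by
  unfold pvChooseA
  apply chooseGo_none
  intro j hj1 hj2
  exact h j (by omega) hj2

-- when max_size < remaining < max_size + min_size and 2*min_size ≤ remaining,
-- the scan skips everything above remaining - min_size and picks it
theorem chooseA_mid {remaining min_size max_size : Int}
    (h1 : max_size < remaining)
    (h2 : remaining < max_size + min_size) (h3 : 2 * min_size ≤ remaining) :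
    pvChooseA remaining min_size max_size = some (remaining - min_size) := by
  have hk : min_size ≤ remaining - min_size := by omega
  -- descend from max_size to remaining - min_size
  have key : ∀ (d : Nat) (M : Int), M = remaining - min_size + d → M ≤ max_size →
      pvChooseA remaining min_size M = some (remaining - min_size) := by
    intro d
    induction d with
    | zero =>
      intro M hM _
      have : M = remaining - min_size := by omega
      subst this
      exact chooseA_head (by omega) (by omega)
    | succ d ih =>
      intro M hM hMle
      rw [chooseA_tail (by omega) (by omega)]
      exact ih (M - 1) (by omega) (by omega)
  exact key (max_size - (remaining - min_size)).toNat max_size (by omega) (by omega)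

-- no chunk fits when remaining < min_size (and remaining ∉ [min,max])
theorem chooseA_none_small {remaining min_size max_size : Int}
    (h0 : 0 < remaining) (h : remaining < min_size) :
    pvChooseA remaining min_size max_size = none :=
  chooseA_none (fun k hk _ hp => by omega)

-- no chunk fits in the band max_size < remaining < 2*min_size, remaining < max_size + min_size
theorem chooseA_none_band {remaining min_size max_size : Int}
    (h1 : max_size < remaining) (h2 : remaining < 2 * min_size) :
    pvChooseA remaining min_size max_size = none :=
  chooseA_none (fun k hk hk' hp => by omega)

-- closed form of B as a plain function (definitionally what the port computes
-- in the main branch), to drive the induction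
theorem alt_pos {total min_size max_size : Int} (h0 : 0 < total)
    (hm : min_size ≤ max_size) (hx : 0 < max_size) :
    split_into_chunks_with_range_alt total min_size max_size =
      (let m := max min_size 1
       let n : Int := if total ≥ max_size + m then PySem.Int.floordiv (total - max_size - m) max_size + 1 else 0
       let leftover := total - n * max_size
       List.replicate n.toNat max_size ++
         (if leftover ≤ max_size ∨ leftover < 2 * min_size then [leftover] else [leftover - min_size, min_size])) := by
  unfold split_into_chunks_with_range_alt
  rw [if_neg (by omega), if_neg (by omega)]

theorem fdiv_pos_eq {a b : Int} (hb : 0 < b) :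
    PySem.Int.floordiv a b = a / b := by
  show Int.fdiv a b = a / b
  rw [Int.fdiv_eq_ediv, if_pos (Or.inl hb.le)]
  ring

-- B "peels one max_size chunk": alt total = max_size :: alt (total - max_size)
theorem alt_step {total min_size max_size : Int}
    (hm : min_size ≤ max_size) (hx : 0 < max_size)
    (hbig : max_size + max min_size 1 ≤ total) :
    split_into_chunks_with_range_alt total min_size max_size =
      max_size :: split_into_chunks_with_range_alt (total - max_size) min_size max_size := by
  have hm1 : 1 ≤ max min_size 1 := le_max_right _ _
  have h0 : 0 < total := by omega
  have h0' : 0 < total - max_size := by omega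
  rw [alt_pos h0 hm hx, alt_pos h0' hm hx]
  simp only []
  set m := max min_size 1 with hmdef
  rw [if_pos (by omega)]
  rw [fdiv_pos_eq hx]
  by_cases hb : total - max_size ≥ max_size + m
  · rw [if_pos hb, fdiv_pos_eq hx]
    have hdiv : (total - max_size - m) / max_size = (total - max_size - max_size - m) / max_size + 1 := by
      have h1 : total - max_size - m = (total - max_size - max_size - m) + 1 * max_size := by ring
      rw [h1, Int.add_mul_ediv_right _ _ (by omega)]
    have hn : (total - max_size - m) / max_size + 1 = ((total - max_size - max_size - m) / max_size + 1) + 1 := by omega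
    rw [hn]
    have hq : 0 ≤ (total - max_size - max_size - m) / max_size := Int.ediv_nonneg (by omega) (by omega)
    have htn : ((total - max_size - max_size - m) / max_size + 1 + 1).toNat
        = ((total - max_size - max_size - m) / max_size + 1).toNat + 1 := by omega
    rw [htn, List.replicate_succ]
    have hL : total - max_size - ((total - max_size - max_size - m) / max_size + 1) * max_size
        = total - ((total - max_size - max_size - m) / max_size + 1 + 1) * max_size := by ring
    rw [hL]
    simp
  · rw [if_neg hb]
    -- here 0 ≤ total - max_size - m < max_size so the quotient is 0
    have hq : (total - max_size - m) / max_size = 0 := by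
      apply Int.ediv_eq_zero_of_lt (by omega) (by omega)
    rw [hq]
    have hL : total - max_size - (0:Int) * max_size = total - (0 + 1) * max_size := by ring
    rw [hL]
    norm_num

-- the tail cases of B, written out
theorem alt_tail {total min_size max_size : Int}
    (hm : min_size ≤ max_size) (hx : 0 < max_size) (h0 : 0 < total)
    (hsmall : total < max_size + max min_size 1) :
    split_into_chunks_with_range_alt total min_size max_size =
      (if total ≤ max_size ∨ total < 2 * min_size then [total] else [total - min_size, min_size]) := by
  rw [alt_pos h0 hm hx]
  simp only []
  rw [if_neg (by omega)]
  norm_num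

-- main invariant: on the live branch the loop equals sizes ++ alt remaining
theorem loopA_eq (fuel : Nat) :
    ∀ (remaining min_size max_size : Int) (sizes : List Int),
    min_size ≤ max_size → 0 < max_size → 0 < remaining → remaining.toNat < fuel →
    pvLoopA fuel remaining min_size max_size sizes
      = sizes ++ split_into_chunks_with_range_alt remaining min_size max_size := by
  induction fuel with
  | zero => intro r mn mx s _ _ hr hf; omega
  | succ fuel ih =>
    intro r mn mx s hm hx hr hf
    have hm1 : 1 ≤ max mn 1 := le_max_right _ _
    unfold pvLoopA
    rw [if_pos (by omega)]
    by_cases hband : mn ≤ r ∧ r ≤ mx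
    · rw [if_pos hband, alt_tail hm hx hr (by omega)]
      rw [if_pos (by omega)]
    · rw [if_neg hband]
      by_cases hbig : mx + max mn 1 ≤ r
      · -- chosen = mx, recurse
        have hch : pvChooseA r mn mx = some mx :=
          chooseA_head (by omega) (by omega)
        rw [hch]
        show pvLoopA fuel (r - mx) mn mx (s ++ [mx]) = s ++ split_into_chunks_with_range_alt r mn mx
        rw [ih (r - mx) mn mx (s ++ [mx]) hm hx (by omega) (by omega)]
        rw [alt_step hm hx hbig]
        simp
      · -- r < mx + max mn 1 and r outside [mn,mx]
        have hrx : mx < r ∨ r < mn := by omega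
        rcases hrx with hgt | hlt
        · -- mx < r < mx + mn (forces 2 ≤ mn since max mn 1 > r - mx ≥ 1)
          have hmn2 : 2 ≤ mn := by omega
          by_cases h2m : 2 * mn ≤ r
          · have hch : pvChooseA r mn mx = some (r - mn) :=
              chooseA_mid hgt (by omega) h2m
            rw [hch]
            show pvLoopA fuel (r - (r - mn)) mn mx (s ++ [r - mn]) = s ++ split_into_chunks_with_range_alt r mn mx
            -- remaining becomes mn: one more iteration emits [mn] via the band
            have : r - (r - mn) = mn := by ring
            rw [this]
            have hfuel2 : fuel = (fuel - 1) + 1 := by omega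
            rw [hfuel2]
            unfold pvLoopA
            rw [if_pos (by omega), if_pos ⟨le_refl mn, hm⟩]
            rw [alt_tail hm hx hr (by omega), if_neg (by omega)]
            simp
          · have hch : pvChooseA r mn mx = none :=
              chooseA_none_band hgt (by omega)
            rw [hch, alt_tail hm hx hr (by omega), if_pos (by omega)]
        · -- r < mn: nothing fits
          have hch : pvChooseA r mn mx = none := chooseA_none_small hr hlt
          rw [hch, alt_tail hm hx hr (by omega), if_pos (by omega)]

-- ===== VERDICT (by name: the statement is the Claim_ definition above) =====
theorem split_into_chunks_with_range_spec : Claim_equal_split_into_chunks_with_range := by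
  intro total min_size max_size _ hpre
  unfold Spec_split_into_chunks_with_range
  unfold split_into_chunks_with_range
  by_cases h0 : total ≤ 0
  · -- loop body not entered; B returns []
    have : total.toNat + 1 = 0 + 1 := by omega
    rw [this]
    unfold pvLoopA
    rw [if_neg (by omega)]
    unfold split_into_chunks_with_range_alt
    rw [if_pos h0]
  · rw [not_le] at h0
    by_cases hm : min_size ≤ max_size
    · have hx : 0 < max_size := by
        rcases hpre with h | h | h
        · omega
        · exact h
        · omega
      rw [loopA_eq (total.toNat + 1) total min_size max_size [] hm hx h0 (by omega)]
      simp
    · -- empty range: A's inner for-loop never runs, chosen = None → [total]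
      rw [not_le] at hm
      have : total.toNat + 1 = (total.toNat) + 1 := rfl
      unfold pvLoopA
      rw [if_pos (by omega), if_neg (by omega)]
      have hch : pvChooseA total min_size max_size = none :=
        chooseA_none (fun k hk hk' _ => by omega)
      rw [hch]
      unfold split_into_chunks_with_range_alt
      rw [if_neg (by omega), if_pos (Or.inl hm)]
      simp
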